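-- pv_equiv track=rewrite | github.com/laibao-ai-token/tradecat | services-preview/markets-service/src/news_defaults.py | extract_source_meta_tags
-- ===== SOURCE A (Python) =====
-- UNKNOWN_TIER = "unknown"
--
-- UNKNOWN_GROUP = "unknown"
--
-- _INTERNAL_SOURCE_GROUP_PREFIX = "tc_source_group:"
--
-- _INTERNAL_SOURCE_TIER_PREFIX = "tc_source_tier:"
--
-- def extract_source_meta_tags(categories: list[str] | tuple[str, ...] | None) -> tuple[str, str]:
--     group = UNKNOWN_GROUP
--     tier = UNKNOWN_TIER
--     for item in categories or []:
--         text = str(item).strip().lower()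
--         if text.startswith(_INTERNAL_SOURCE_GROUP_PREFIX):
--             group = text[len(_INTERNAL_SOURCE_GROUP_PREFIX) :] or UNKNOWN_GROUP
--         elif text.startswith(_INTERNAL_SOURCE_TIER_PREFIX):
--             tier = text[len(_INTERNAL_SOURCE_TIER_PREFIX) :] or UNKNOWN_TIER
--     return group, tier
-- ===== SOURCE B (Python) =====
-- UNKNOWN_TIER = "unknown"
-- UNKNOWN_GROUP = "unknown"
-- _INTERNAL_SOURCE_GROUP_PREFIX = "tc_source_group:"
-- _INTERNAL_SOURCE_TIER_PREFIX = "tc_source_tier:"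
--
--
-- def extract_source_meta_tags(categories):
--     # Scan backwards: the FIRST match seen in reverse order is A's last match.
--     # Stop as soon as both tags have been found.
--     group = None
--     tier = None
--     for item in reversed(list(categories or [])):
--         text = str(item).strip().lower()
--         if text.startswith(_INTERNAL_SOURCE_GROUP_PREFIX):
--             if group is None:
--                 group = text[len(_INTERNAL_SOURCE_GROUP_PREFIX):] or UNKNOWN_GROUP
--         elif text.startswith(_INTERNAL_SOURCE_TIER_PREFIX):
--             if tier is None:
--                 tier = text[len(_INTERNAL_SOURCE_TIER_PREFIX):] or UNKNOWN_TIER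
--         if group is not None and tier is not None:
--             break
--     return (group if group is not None else UNKNOWN_GROUP,
--             tier if tier is not None else UNKNOWN_TIER)
-- ===== Notes on version B (the rewrite author's own statement) =====
-- stated objective: alternative
-- what changed: B scans the categories in reverse with first-match-wins Option state and breaks out as soon as both group and tier are found, instead of A's forward full pass with last-match-wins overwriting.
import Mathlib
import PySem

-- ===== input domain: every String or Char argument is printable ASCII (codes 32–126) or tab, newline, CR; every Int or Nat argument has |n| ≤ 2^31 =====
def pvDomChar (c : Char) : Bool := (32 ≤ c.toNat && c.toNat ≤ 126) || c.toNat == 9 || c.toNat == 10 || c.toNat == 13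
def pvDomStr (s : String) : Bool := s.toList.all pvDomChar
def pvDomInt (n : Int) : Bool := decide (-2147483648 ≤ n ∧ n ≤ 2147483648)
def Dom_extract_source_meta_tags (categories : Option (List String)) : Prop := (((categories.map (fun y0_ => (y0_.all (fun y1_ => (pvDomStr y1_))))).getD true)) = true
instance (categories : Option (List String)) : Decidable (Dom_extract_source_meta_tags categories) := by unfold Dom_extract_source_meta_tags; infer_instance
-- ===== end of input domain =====

-- B scans the list in reverse with first-match-wins state and breaks once both tags are found,
-- instead of A's forward full pass with last-match-wins overwriting (objective: alternative).

-- shared helpers: `str(item).strip().lower()` and the `text[len(prefix):] or UNKNOWN_*` suffix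
def esmtText (item : String) : String := PySem.Str.lower (PySem.Str.strip item)

def esmtGroupVal (text : String) : String :=
  let s := PySem.Str.slice text (some 16) none   -- text[len("tc_source_group:"):]
  if s = "" then "unknown" else s                -- `or UNKNOWN_GROUP`

def esmtTierVal (text : String) : String :=
  let s := PySem.Str.slice text (some 15) none   -- text[len("tc_source_tier:"):]
  if s = "" then "unknown" else s                -- `or UNKNOWN_TIER`

-- ===== PORT A =====
def esmtStep (st : String × String) (item : String) : String × String :=
  let text := esmtText item
  if PySem.Str.startswith text "tc_source_group:" then (esmtGroupVal text, st.2)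
  else if PySem.Str.startswith text "tc_source_tier:" then (st.1, esmtTierVal text)
  else st

def extract_source_meta_tags (categories : Option (List String)) : String × String :=
  (categories.getD []).foldl esmtStep ("unknown", "unknown")

-- ===== PORT B =====
-- the reversed loop with early break; `group`/`tier` are `None`-initialised Options
def esmtLoop : List String → Option String → Option String → String × String
  | [], g, t => (g.getD "unknown", t.getD "unknown")
  | item :: rest, g, t =>
    let text := esmtText item
    let g' := if PySem.Str.startswith text "tc_source_group:" then
                (if g.isNone then some (esmtGroupVal text) else g)
              else g
    let t' := if !(PySem.Str.startswith text "tc_source_group:")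
                 && PySem.Str.startswith text "tc_source_tier:" then
                (if t.isNone then some (esmtTierVal text) else t)
              else t
    if g'.isSome && t'.isSome then (g'.getD "unknown", t'.getD "unknown")   -- break
    else esmtLoop rest g' t'

def extract_source_meta_tags_alt (categories : Option (List String)) : String × String :=
  esmtLoop (categories.getD []).reverse none none

-- ===== PRECONDITION & SPEC =====
def Spec_extract_source_meta_tags (categories : Option (List String)) (out : String × String) : Prop := out = extract_source_meta_tags_alt categories
instance (categories : Option (List String)) (out : String × String) : Decidable (Spec_extract_source_meta_tags categories out) := by unfold Spec_extract_source_meta_tags; infer_instance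

-- ===== CLAIM (what is proved, stated in full; the proofs are below) =====
def Claim_equal_extract_source_meta_tags : Prop := ∀ (categories : Option (List String)), Dom_extract_source_meta_tags categories → Spec_extract_source_meta_tags categories (extract_source_meta_tags categories)

-- ===== LEMMAS AND PROOFS =====
-- invariant: running B's loop on r with pre-seeded options og/ot yields og/ot where set,
-- and otherwise A's forward fold over r.reverse (first match backward = last match forward)
theorem esmtLoop_eq (r : List String) : ∀ (og ot : Option String),
    esmtLoop r og ot =
      (og.getD (r.reverse.foldl esmtStep ("unknown", "unknown")).1,
       ot.getD (r.reverse.foldl esmtStep ("unknown", "unknown")).2) := by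
  induction r with
  | nil => intro og ot; simp [esmtLoop]
  | cons x r' ih =>
    intro og ot
    simp only [esmtLoop, List.reverse_cons, List.foldl_append, List.foldl_cons, List.foldl_nil]
    by_cases hG : PySem.Str.startswith (esmtText x) "tc_source_group:" = true <;>
      by_cases hT : PySem.Str.startswith (esmtText x) "tc_source_tier:" = true <;>
        simp at hG hT <;>
            cases og <;> cases ot <;>
              simp [esmtStep, ih, hG, hT]

-- ===== VERDICT (by name: the statement is the Claim_ definition above) =====
theorem extract_source_meta_tags_spec : Claim_equal_extract_source_meta_tags := by
  intro categories _
  unfold Spec_extract_source_meta_tags extract_source_meta_tags extract_source_meta_tags_alt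
  rw [esmtLoop_eq]
  simp
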